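-- pv_equiv track=rewrite | github.com/facebookresearch/multisense_consistency | template_data/addition/arithmetics_utils.py | italian_number_generator
-- ===== SOURCE A (Python) =====
-- numbers_it = {
--     "0": "zero", "1": "uno", "2": "due", "3": "tre", "4": "quattro", "5": "cinque", "6": "sei", "7": "sette",
--     "8": "otto", "9": "nove", "10": "dieci", "11": "undici", "12": "dodici", "13": "tredici", "14": "quattordici",
--     "15": "quindici", "16": "sedici", "17": "diciassette", "18": "diciotto", "19": "diciannove", "20": "venti",
--     "23": "ventitré", "30": "trenta", "33": "trentatré", "40": "quaranta", "43": "quarantatré", "50": "cinquanta",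
--     "53": "cinquantatré", "60": "sessanta", "63": "sessantatré", "70": "settanta", "73": "settantatré", "80": "ottanta",
--     "83": "ottantatré", "90": "novanta", "93": "novantatré", "100": "cento"
-- }
--
-- def italian_number_generator(input_number):
--     def from_three_digits(input_number):
--
--         output_number = ""
--
--         if len(input_number) == 3:
--             if sum([int(i) for i in input_number]) != 0:
--                 if input_number[0] != "0":
--                     if input_number[0] == "1":
--                         output_number += "cento"
--                     else:
--                         output_number += numbers_it[input_number[0]] + "cento"
--                 input_number = input_number[1:]
--             else:
--                 input_number = ""
--
--         if len(input_number) == 2: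
--             if input_number in numbers_it.keys():
--                 output_number += numbers_it[input_number]
--                 input_number = ""
--             elif input_number == "00":
--                 input_number = ""
--             elif input_number[0] == "0":
--                 input_number = input_number[1:]
--             else:
--                 output_number += numbers_it[input_number[0] + "0"]
--                 input_number = input_number[1:]
--                 if input_number == "1" or input_number == "8":
--                     output_number = output_number[:-1]
--
--         if len(input_number) == 1:
--             output_number += numbers_it[input_number]
--
--         return output_number
--
--     output_number = ""
--     if len(input_number) > 3:
--         if input_number[0:-3] == "1":
--             output_number += "mille"
--         else:
--             output_number += from_three_digits(input_number[0:-3]) + "mila"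
--     if sum([int(i) for i in input_number[-3:]]) > 0:
--         output_number += from_three_digits(input_number[-3:])
--     if input_number == "0":
--         output_number = "zero"
--
--     return output_number
-- ===== SOURCE B (Python) =====
-- # B parses each digit group to an integer and renders words by recursion on the
-- # numeric value (units / teens / tens with apocope / hundreds recursing on v%100),
-- # replacing A's destructive string rewriting over a mixed one/two-digit dictionary;
-- # the sum(...)>0 guard disappears (all-zero groups render to "" anyway).
--
-- SMALL = ["zero", "uno", "due", "tre", "quattro", "cinque", "sei", "sette", "otto", "nove"]
-- TEENS = ["dieci", "undici", "dodici", "tredici", "quattordici", "quindici", "sedici",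
--          "diciassette", "diciotto", "diciannove"]
-- TENS = ["", "", "venti", "trenta", "quaranta", "cinquanta", "sessanta", "settanta",
--         "ottanta", "novanta"]
--
--
-- def italian_number_generator(input_number):
--     def words(v):
--         # 1 <= v <= 999: recursion on the numeric value
--         if v < 10:
--             return SMALL[v]
--         if v < 20:
--             return TEENS[v - 10]
--         if v < 100:
--             t, u = divmod(v, 10)
--             stem = TENS[t]
--             if u == 0:
--                 return stem
--             if u in (1, 8):
--                 stem = stem[:-1]  # apocope before a vowel
--             return stem + ("tr\u00e9" if u == 3 else SMALL[u])
--         h, r = divmod(v, 100)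
--         stem = "cento" if h == 1 else SMALL[h] + "cento"
--         return stem if r == 0 else stem + words(r)
--
--     def group(g):
--         # a 1-to-3-char digit group; '' otherwise (longer prefixes are never read)
--         if not 1 <= len(g) <= 3:
--             return ""
--         v = int(g)
--         if v == 0:
--             return "zero" if len(g) == 1 else ""
--         return words(v)
--
--     out = ""
--     if len(input_number) > 3:
--         prefix = input_number[:-3]
--         out = "mille" if prefix == "1" else group(prefix) + "mila"
--     out += group(input_number[-3:])
--     return "zero" if input_number == "0" else out
-- ===== Notes on version B (the rewrite author's own statement) =====
-- stated objective: alternative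
-- what changed: B converts each digit group to an integer and renders words by recursion on the numeric value (units/teens/tens-with-apocope, hundreds recursing on v%100), dropping A's sum()>0 tail guard, instead of A's destructive string rewriting over a mixed one/two-digit dictionary.
import Mathlib
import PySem

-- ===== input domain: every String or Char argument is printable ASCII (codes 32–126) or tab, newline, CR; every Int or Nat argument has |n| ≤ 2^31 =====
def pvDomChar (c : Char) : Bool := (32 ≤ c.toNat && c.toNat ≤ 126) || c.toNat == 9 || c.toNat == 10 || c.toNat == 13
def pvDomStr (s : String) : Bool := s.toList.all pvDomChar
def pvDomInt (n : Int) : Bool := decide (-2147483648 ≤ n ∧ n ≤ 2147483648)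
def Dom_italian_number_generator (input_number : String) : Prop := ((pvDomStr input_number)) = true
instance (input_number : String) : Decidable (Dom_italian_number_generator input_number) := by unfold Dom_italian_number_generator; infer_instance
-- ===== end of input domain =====

-- B parses each digit group to an integer and renders words by recursion on the numeric value,
-- replacing A's destructive string rewriting over a mixed one/two-digit dictionary; objective: alternative.

-- All word literals are written as explicit Char lists so the kernel can evaluate the ports.

-- ===== PORT A =====
-- The module dict numbers_it, keyed/valued as List Char.
def nitA : PySem.Dict (List Char) (List Char) := PySem.Dict.ofList
  [(['0'], ['z', 'e', 'r', 'o']),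
   (['1'], ['u', 'n', 'o']),
   (['2'], ['d', 'u', 'e']),
   (['3'], ['t', 'r', 'e']),
   (['4'], ['q', 'u', 'a', 't', 't', 'r', 'o']),
   (['5'], ['c', 'i', 'n', 'q', 'u', 'e']),
   (['6'], ['s', 'e', 'i']),
   (['7'], ['s', 'e', 't', 't', 'e']),
   (['8'], ['o', 't', 't', 'o']),
   (['9'], ['n', 'o', 'v', 'e']),
   (['1', '0'], ['d', 'i', 'e', 'c', 'i']),
   (['1', '1'], ['u', 'n', 'd', 'i', 'c', 'i']),
   (['1', '2'], ['d', 'o', 'd', 'i', 'c', 'i']),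
   (['1', '3'], ['t', 'r', 'e', 'd', 'i', 'c', 'i']),
   (['1', '4'], ['q', 'u', 'a', 't', 't', 'o', 'r', 'd', 'i', 'c', 'i']),
   (['1', '5'], ['q', 'u', 'i', 'n', 'd', 'i', 'c', 'i']),
   (['1', '6'], ['s', 'e', 'd', 'i', 'c', 'i']),
   (['1', '7'], ['d', 'i', 'c', 'i', 'a', 's', 's', 'e', 't', 't', 'e']),
   (['1', '8'], ['d', 'i', 'c', 'i', 'o', 't', 't', 'o']),
   (['1', '9'], ['d', 'i', 'c', 'i', 'a', 'n', 'n', 'o', 'v', 'e']),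
   (['2', '0'], ['v', 'e', 'n', 't', 'i']),
   (['2', '3'], ['v', 'e', 'n', 't', 'i', 't', 'r', 'é']),
   (['3', '0'], ['t', 'r', 'e', 'n', 't', 'a']),
   (['3', '3'], ['t', 'r', 'e', 'n', 't', 'a', 't', 'r', 'é']),
   (['4', '0'], ['q', 'u', 'a', 'r', 'a', 'n', 't', 'a']),
   (['4', '3'], ['q', 'u', 'a', 'r', 'a', 'n', 't', 'a', 't', 'r', 'é']),
   (['5', '0'], ['c', 'i', 'n', 'q', 'u', 'a', 'n', 't', 'a']),
   (['5', '3'], ['c', 'i', 'n', 'q', 'u', 'a', 'n', 't', 'a', 't', 'r', 'é']),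
   (['6', '0'], ['s', 'e', 's', 's', 'a', 'n', 't', 'a']),
   (['6', '3'], ['s', 'e', 's', 's', 'a', 'n', 't', 'a', 't', 'r', 'é']),
   (['7', '0'], ['s', 'e', 't', 't', 'a', 'n', 't', 'a']),
   (['7', '3'], ['s', 'e', 't', 't', 'a', 'n', 't', 'a', 't', 'r', 'é']),
   (['8', '0'], ['o', 't', 't', 'a', 'n', 't', 'a']),
   (['8', '3'], ['o', 't', 't', 'a', 'n', 't', 'a', 't', 'r', 'é']),
   (['9', '0'], ['n', 'o', 'v', 'a', 'n', 't', 'a']),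
   (['9', '3'], ['n', 'o', 'v', 'a', 'n', 't', 'a', 't', 'r', 'é']),
   (['1', '0', '0'], ['c', 'e', 'n', 't', 'o'])]

-- sum([int(i) for i in s]); int(c) = PySem.Int.ofChars? [c] (getD 0 unreachable under Pre_)
def sumIntA (l : List Char) : Int := (l.map (fun c => (PySem.Int.ofChars? [c]).getD 0)).sum

-- from_three_digits, transliterated: the three sequential ifs of the Python body become three
-- stages, each threading the pair (output_number, input_number).  input_number[0] is headD ' '
-- (nonempty in every branch that reads it); numbers_it[k] is nitA.getD k [] (KeyError
-- unreachable under Pre_); output_number[:-1] is dropLast (exact for s[:-1]).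
def stageA1 (l : List Char) : List Char × List Char :=
  if l.length = 3 then
    if sumIntA l ≠ 0 then
      (if l.headD ' ' ≠ '0' then
         (if l.headD ' ' = '1' then ['c', 'e', 'n', 't', 'o'] else nitA.getD [l.headD ' '] [] ++ ['c', 'e', 'n', 't', 'o'])
       else [], l.tail)
    else ([], [])
  else ([], l)

def stageA2 (st : List Char × List Char) : List Char × List Char :=
  if st.2.length = 2 then
    if (nitA.get? st.2).isSome then (st.1 ++ nitA.getD st.2 [], [])
    else if st.2 = ['0', '0'] then (st.1, [])
    else if st.2.headD ' ' = '0' then (st.1, st.2.tail)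
    else
      let out := st.1 ++ nitA.getD [st.2.headD ' ', '0'] []
      let inp := st.2.tail
      if inp = ['1'] ∨ inp = ['8'] then (out.dropLast, inp) else (out, inp)
  else st

def stageA3 (st : List Char × List Char) : List Char :=
  if st.2.length = 1 then st.1 ++ nitA.getD st.2 [] else st.1

def fromThreeA (l : List Char) : List Char := stageA3 (stageA2 (stageA1 l))

-- s[0:-3] for len > 3 is take (len-3); s[-3:] is drop (len-3) (Nat subtraction clamps at 0,
-- exactly Python's negative-slice clamping) — both exact on these inputs.
def italian_number_generator (input_number : String) : String :=
  let s := input_number.toList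
  let out : List Char :=
    if 3 < s.length then
      if s.take (s.length - 3) = ['1'] then ['m', 'i', 'l', 'l', 'e']
      else fromThreeA (s.take (s.length - 3)) ++ ['m', 'i', 'l', 'a']
    else []
  let out := if 0 < sumIntA (s.drop (s.length - 3)) then out ++ fromThreeA (s.drop (s.length - 3)) else out
  String.ofList (if s = ['0'] then ['z', 'e', 'r', 'o'] else out)

-- ===== PORT B =====
def smallW : List (List Char) :=
  [['z', 'e', 'r', 'o'],
   ['u', 'n', 'o'],
   ['d', 'u', 'e'],
   ['t', 'r', 'e'],
   ['q', 'u', 'a', 't', 't', 'r', 'o'],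
   ['c', 'i', 'n', 'q', 'u', 'e'],
   ['s', 'e', 'i'],
   ['s', 'e', 't', 't', 'e'],
   ['o', 't', 't', 'o'],
   ['n', 'o', 'v', 'e']]
def teensW : List (List Char) :=
  [['d', 'i', 'e', 'c', 'i'],
   ['u', 'n', 'd', 'i', 'c', 'i'],
   ['d', 'o', 'd', 'i', 'c', 'i'],
   ['t', 'r', 'e', 'd', 'i', 'c', 'i'],
   ['q', 'u', 'a', 't', 't', 'o', 'r', 'd', 'i', 'c', 'i'],
   ['q', 'u', 'i', 'n', 'd', 'i', 'c', 'i'],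
   ['s', 'e', 'd', 'i', 'c', 'i'],
   ['d', 'i', 'c', 'i', 'a', 's', 's', 'e', 't', 't', 'e'],
   ['d', 'i', 'c', 'i', 'o', 't', 't', 'o'],
   ['d', 'i', 'c', 'i', 'a', 'n', 'n', 'o', 'v', 'e']]
def tensW : List (List Char) :=
  [[],
   [],
   ['v', 'e', 'n', 't', 'i'],
   ['t', 'r', 'e', 'n', 't', 'a'],
   ['q', 'u', 'a', 'r', 'a', 'n', 't', 'a'],
   ['c', 'i', 'n', 'q', 'u', 'a', 'n', 't', 'a'],
   ['s', 'e', 's', 's', 'a', 'n', 't', 'a'],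
   ['s', 'e', 't', 't', 'a', 'n', 't', 'a'],
   ['o', 't', 't', 'a', 'n', 't', 'a'],
   ['n', 'o', 'v', 'a', 'n', 't', 'a']]

-- words(v): recursion on the numeric value 1 <= v <= 999 (the recursive call is on v % 100 < v);
-- the fuel argument (starting at v itself, always sufficient) only makes the recursion structural.
def wordsBAux : Nat → Nat → List Char
  | 0, _ => []
  | fuel + 1, v =>
    if v < 10 then smallW.getD v []
    else if v < 20 then teensW.getD (v - 10) []
    else if v < 100 then
      let t := v / 10
      let u := v % 10
      let stem := tensW.getD t []
      if u = 0 then stem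
      else
        let stem := if u = 1 ∨ u = 8 then stem.dropLast else stem  -- apocope before a vowel
        stem ++ (if u = 3 then ['t', 'r', 'é'] else smallW.getD u [])
    else
      let h := v / 100
      let r := v % 100
      let stem := if h = 1 then ['c', 'e', 'n', 't', 'o'] else smallW.getD h [] ++ ['c', 'e', 'n', 't', 'o']
      if r = 0 then stem else stem ++ wordsBAux fuel r

def wordsB (v : Nat) : List Char := wordsBAux v v

-- group(g): int(g) for an all-digit group is PySem.Int.ofChars? (getD 0 unreachable under Pre_).
def groupB (g : List Char) : List Char :=
  if 1 ≤ g.length ∧ g.length ≤ 3 then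
    let v := ((PySem.Int.ofChars? g).getD 0).toNat
    if v = 0 then (if g.length = 1 then ['z', 'e', 'r', 'o'] else []) else wordsB v
  else []

def italian_number_generator_alt (input_number : String) : String :=
  let s := input_number.toList
  let out : List Char :=
    if 3 < s.length then
      let p := s.take (s.length - 3)
      if p = ['1'] then ['m', 'i', 'l', 'l', 'e'] else groupB p ++ ['m', 'i', 'l', 'a']
    else []
  let out := out ++ groupB (s.drop (s.length - 3))
  String.ofList (if s = ['0'] then ['z', 'e', 'r', 'o'] else out)

-- ===== PRECONDITION & SPEC =====
-- The ten decimal digit characters.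
def pvDg : List Char := ['0', '1', '2', '3', '4', '5', '6', '7', '8', '9']
-- Pre_ admits exactly the inputs Python A returns on: the last three characters must be decimal
-- digits (else int() raises ValueError), and when the thousands prefix has length 1–3 (4 ≤ len ≤ 6)
-- it must be all digits too (else the dictionary lookup raises KeyError); a prefix longer than
-- three characters is never inspected by A, so it stays unconstrained.
def Pre_italian_number_generator (input_number : String) : Prop :=
  ((input_number.toList.drop (input_number.toList.length - 3)).all (fun c => decide (c ∈ pvDg))) = true ∧
  (input_number.toList.length ≤ 3 ∨ 6 < input_number.toList.length ∨
    ((input_number.toList.take (input_number.toList.length - 3)).all (fun c => decide (c ∈ pvDg))) = true)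
instance (input_number : String) : Decidable (Pre_italian_number_generator input_number) := by
  unfold Pre_italian_number_generator; infer_instance

def pvWitness_italian_number_generator : String := "2023"

def Spec_italian_number_generator (input_number : String) (out : String) : Prop := out = italian_number_generator_alt input_number
instance (input_number : String) (out : String) : Decidable (Spec_italian_number_generator input_number out) := by unfold Spec_italian_number_generator; infer_instance

-- ===== CLAIM (what is proved, stated in full; the proofs are below) =====
def Claim_equal_italian_number_generator : Prop := ∀ (input_number : String), Dom_italian_number_generator input_number → Pre_italian_number_generator input_number → Spec_italian_number_generator input_number (italian_number_generator input_number)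

-- ===== LEMMAS AND PROOFS =====

theorem pv_fromThreeA_long (l : List Char) (h : 3 < l.length) : fromThreeA l = [] := by
  have h3 : l.length ≠ 3 := by omega
  have h2 : l.length ≠ 2 := by omega
  have h1 : l.length ≠ 1 := by omega
  show stageA3 (stageA2 (stageA1 l)) = []
  rw [stageA1, if_neg h3, stageA2, if_neg (by simpa using h2), stageA3, if_neg (by simpa using h1)]

theorem pv_groupB_long (l : List Char) (h : 3 < l.length) : groupB l = [] := by
  rw [groupB, if_neg (by omega)]

set_option maxRecDepth 8192 in
set_option maxHeartbeats 2000000 in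
theorem pv_group_eq (l : List Char) (hd : ∀ c ∈ l, c ∈ pvDg)
    (hl : l.length ≤ 3) : fromThreeA l = groupB l := by
  match l with
  | [] => decide
  | [a] =>
    have H : (pvDg.all fun a => fromThreeA [a] == groupB [a]) = true := by decide
    exact eq_of_beq (List.all_eq_true.mp H a (hd a (by simp)))
  | [a, b] =>
    have H : (pvDg.all fun a => pvDg.all fun b =>
        fromThreeA [a, b] == groupB [a, b]) = true := by decide
    exact eq_of_beq (List.all_eq_true.mp
      (List.all_eq_true.mp H a (hd a (by simp))) b (hd b (by simp)))
  | [a, b, c] =>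
    have H : (pvDg.all fun a => pvDg.all fun b =>
        pvDg.all fun c => fromThreeA [a, b, c] == groupB [a, b, c]) = true := by
      decide
    exact eq_of_beq (List.all_eq_true.mp (List.all_eq_true.mp
      (List.all_eq_true.mp H a (hd a (by simp))) b (hd b (by simp))) c (hd c (by simp)))
  | _ :: _ :: _ :: _ :: _ => simp at hl; omega

theorem pv_digit_val (c : Char) (hc : c ∈ pvDg) :
    0 ≤ (PySem.Int.ofChars? [c]).getD 0 ∧ ((PySem.Int.ofChars? [c]).getD 0 = 0 ↔ c = '0') := by
  fin_cases hc <;> exact ⟨by decide, by decide⟩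

theorem pv_sum_nonneg (l : List Char) (hd : ∀ c ∈ l, c ∈ pvDg) : 0 ≤ sumIntA l := by
  induction l with
  | nil => simp [sumIntA]
  | cons c t ih =>
    have hc := (pv_digit_val c (hd c (by simp))).1
    have hstep : sumIntA (c :: t) = (PySem.Int.ofChars? [c]).getD 0 + sumIntA t := by
      simp [sumIntA]
    have := ih (fun x hx => hd x (by simp [hx]))
    omega

-- sum([int(i) for i in l]) ≤ 0 on digits means every character is '0'.
theorem pv_sum_zero (l : List Char) (hd : ∀ c ∈ l, c ∈ pvDg) (hs : ¬ 0 < sumIntA l) :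
    ∀ c ∈ l, c = '0' := by
  induction l with
  | nil => simp
  | cons c t ih =>
    have hc := pv_digit_val c (hd c (by simp))
    have ht : ∀ x ∈ t, x ∈ pvDg := fun x hx => hd x (by simp [hx])
    have hnn : 0 ≤ sumIntA t := pv_sum_nonneg t ht
    have hstep : sumIntA (c :: t) = (PySem.Int.ofChars? [c]).getD 0 + sumIntA t := by
      simp [sumIntA]
    intro x hx
    rcases List.mem_cons.mp hx with rfl | hx
    · exact hc.2.mp (by omega)
    · exact ih ht (by omega) x hx

-- An all-'0' group of length ≠ 1 renders to [] under B.
theorem pv_groupB_zeros (l : List Char) (h0 : ∀ c ∈ l, c = '0') (h1 : l.length ≠ 1) :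
    groupB l = [] := by
  match l with
  | [] => decide
  | [a] => exact absurd rfl h1
  | [a, b] =>
    have ha := h0 a (by simp); have hb := h0 b (by simp); subst ha hb; decide
  | [a, b, c] =>
    have ha := h0 a (by simp); have hb := h0 b (by simp); have hc := h0 c (by simp)
    subst ha hb hc; decide
  | _ :: _ :: _ :: d :: t => rw [groupB, if_neg (fun h => by simp at h; omega)]

-- ===== VERDICT (by name: the statement is the Claim_ definition above) =====
theorem italian_number_generator_spec : Claim_equal_italian_number_generator := by
  intro inp _ hpre
  obtain ⟨htail, hpref⟩ := hpre
  set s := inp.toList with hs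
  have htail' : ∀ c ∈ s.drop (s.length - 3), c ∈ pvDg :=
    fun c hc => of_decide_eq_true (List.all_eq_true.mp htail c hc)
  have htailLen : (s.drop (s.length - 3)).length ≤ 3 := by
    simp only [List.length_drop]; omega
  -- the two prefix renderings agree
  have hfrP : (if 3 < s.length then
      if s.take (s.length - 3) = ['1'] then ['m', 'i', 'l', 'l', 'e']
      else fromThreeA (s.take (s.length - 3)) ++ ['m', 'i', 'l', 'a']
    else []) = (if 3 < s.length then
      if s.take (s.length - 3) = ['1'] then ['m', 'i', 'l', 'l', 'e']
      else groupB (s.take (s.length - 3)) ++ ['m', 'i', 'l', 'a']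
    else []) := by
    by_cases hl : 3 < s.length
    · rw [if_pos hl, if_pos hl]
      by_cases h1 : s.take (s.length - 3) = ['1']
      · rw [if_pos h1, if_pos h1]
      · rw [if_neg h1, if_neg h1]
        congr 1
        by_cases h6 : 6 < s.length
        · have hlong : 3 < (s.take (s.length - 3)).length := by
            rw [List.length_take]; omega
          rw [pv_fromThreeA_long _ hlong, pv_groupB_long _ hlong]
        · have hdig : ∀ c ∈ s.take (s.length - 3), c ∈ pvDg := by
            rcases hpref with h | h | h
            · exact absurd hl (by omega)
            · exact absurd h h6
            · exact fun c hc => of_decide_eq_true (List.all_eq_true.mp h c hc)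
          exact pv_group_eq _ hdig (by rw [List.length_take]; omega)
    · rw [if_neg hl, if_neg hl]
  show italian_number_generator inp = italian_number_generator_alt inp
  rw [italian_number_generator, italian_number_generator_alt]
  simp only [← hs]
  refine congrArg String.ofList ?_
  by_cases hz : s = ['0']
  · rw [if_pos hz, if_pos hz]
  · rw [if_neg hz, if_neg hz, hfrP]
    by_cases hp : 0 < sumIntA (s.drop (s.length - 3))
    · rw [if_pos hp, pv_group_eq _ htail' htailLen]
    · rw [if_neg hp]
      have h0 : ∀ c ∈ s.drop (s.length - 3), c = '0' := pv_sum_zero _ htail' hp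
      have hne1 : (s.drop (s.length - 3)).length ≠ 1 := by
        intro hlen1
        apply hz
        have hslen : s.length = 1 := by
          rw [List.length_drop] at hlen1; omega
        have : s.drop (s.length - 3) = s := by
          have h0' : s.length - 3 = 0 := by omega
          rw [h0', List.drop_zero]
        rw [this] at hlen1 h0
        match s, hslen with
        | [a], _ => rw [h0 a (by simp)]
      rw [pv_groupB_zeros _ h0 hne1, List.append_nil]
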